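-- pv_equiv track=rewrite | github.com/rein-afk-glitch/finalqueup | simplified_backend/app.py | mix_priority_waiting
-- ===== SOURCE A (Python) =====
-- def mix_priority_waiting(waiting_entries):
--     regular = [entry for entry in waiting_entries if entry.get('priority') != 'senior_pwd']
--     senior = [entry for entry in waiting_entries if entry.get('priority') == 'senior_pwd']
--     mixed = []
--     reg_idx = 0
--     sen_idx = 0
--
--     while reg_idx < len(regular) or sen_idx < len(senior):
--         for _ in range(3):
--             if reg_idx < len(regular):
--                 mixed.append(regular[reg_idx])
--                 reg_idx += 1
--         if sen_idx < len(senior):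
--             mixed.append(senior[sen_idx])
--             sen_idx += 1
--         if reg_idx >= len(regular) and sen_idx < len(senior):
--             mixed.extend(senior[sen_idx:])
--             break
--     return mixed
-- ===== SOURCE B (Python) =====
-- def mix_priority_waiting(waiting_entries):
--     regular, senior = [], []
--     for entry in waiting_entries:
--         (senior if entry.get('priority') == 'senior_pwd' else regular).append(entry)
--     nblocks = max((len(regular) + 2) // 3, len(senior))
--     mixed = []
--     for k in range(nblocks):
--         mixed.extend(regular[3 * k:3 * k + 3])
--         mixed.extend(senior[k:k + 1])
--     return mixed
-- ===== Notes on version B (the rewrite author's own statement) =====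
-- stated objective: simpler
-- what changed: Replaced the while-loop with two cursors, an unrolled inner for-loop and a break-driven tail dump by a single partition pass plus one block-indexed for-loop over range(nblocks) that slices 3 regulars and 1 senior per block; no index bookkeeping or break remains.
import Mathlib
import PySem

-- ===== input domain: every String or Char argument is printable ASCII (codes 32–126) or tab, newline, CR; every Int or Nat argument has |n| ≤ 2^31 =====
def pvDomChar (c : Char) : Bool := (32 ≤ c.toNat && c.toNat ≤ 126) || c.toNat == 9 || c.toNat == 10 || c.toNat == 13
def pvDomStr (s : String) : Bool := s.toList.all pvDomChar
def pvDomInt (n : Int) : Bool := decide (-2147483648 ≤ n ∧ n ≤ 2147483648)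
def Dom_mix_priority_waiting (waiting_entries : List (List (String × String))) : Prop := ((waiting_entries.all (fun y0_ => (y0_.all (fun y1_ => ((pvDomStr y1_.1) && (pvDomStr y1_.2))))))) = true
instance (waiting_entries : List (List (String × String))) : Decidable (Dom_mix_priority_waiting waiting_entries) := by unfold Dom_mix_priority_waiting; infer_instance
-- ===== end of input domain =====

-- B replaces A's two-cursor while loop (with unrolled inner for and break) by one
-- block-indexed for-loop over slices; same return value, no speed claim.

-- entry.get('priority'): first-match lookup in the association list (Python dict.get); exact on dicts
def pvGetPriority (e : List (String × String)) : Option String :=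
  (e.find? (fun p => p.1 == "priority")).map (·.2)

-- ===== PORT A =====
-- one step of A's inner 'for _ in range(3)': if reg_idx < len(regular): append regular[reg_idx]; reg_idx += 1
def pvStepReg (regular : List (List (String × String)))
    (st : List (List (String × String)) × Nat) : List (List (String × String)) × Nat :=
  match regular[st.2]? with
  | some e => (st.1 ++ [e], st.2 + 1)
  | none => st

-- characterisation of one step (needed for the termination argument below)
theorem pvStepReg_eq (regular : List (List (String × String)))
    (st : List (List (String × String)) × Nat) :
    pvStepReg regular st =
      (st.1 ++ (regular.drop st.2).take 1,
       if st.2 < regular.length then st.2 + 1 else st.2) := by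
  simp only [pvStepReg]
  rcases Nat.lt_or_ge st.2 regular.length with h | h
  · simp [List.take_one_drop_eq_of_lt_length h, h]
  · simp [List.drop_eq_nil_of_le h, Nat.not_lt.mpr h]

theorem pvStep3_snd (regular mixed : List (List (String × String))) (ri : Nat) :
    ri ≤ (pvStepReg regular (pvStepReg regular (pvStepReg regular (mixed, ri)))).2 ∧
    (pvStepReg regular (pvStepReg regular (pvStepReg regular (mixed, ri)))).2 ≤ max ri regular.length ∧
    (ri < regular.length → ri < (pvStepReg regular (pvStepReg regular (pvStepReg regular (mixed, ri)))).2) := by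
  simp only [pvStepReg_eq]
  split_ifs <;> omega

-- A's while loop; each admitted iteration advances a cursor, hence termination
def pvMixLoop (regular senior : List (List (String × String)))
    (reg_idx sen_idx : Nat) (mixed : List (List (String × String))) :
    List (List (String × String)) :=
  if h : reg_idx < regular.length ∨ sen_idx < senior.length then
    let s := pvStepReg regular (pvStepReg regular (pvStepReg regular (mixed, reg_idx)))
    if hs : sen_idx < senior.length then
      let mixed' := s.1 ++ [senior.getD sen_idx []]
      if s.2 ≥ regular.length ∧ sen_idx + 1 < senior.length then
        mixed' ++ senior.drop (sen_idx + 1)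
      else
        pvMixLoop regular senior s.2 (sen_idx + 1) mixed'
    else
      if s.2 ≥ regular.length ∧ sen_idx < senior.length then
        s.1 ++ senior.drop sen_idx
      else
        pvMixLoop regular senior s.2 sen_idx s.1
  else mixed
  termination_by (regular.length - reg_idx) + (senior.length - sen_idx)
  decreasing_by
  · have h3 := pvStep3_snd regular mixed reg_idx
    omega
  · have hlt : reg_idx < regular.length := by tauto
    have h3 := pvStep3_snd regular mixed reg_idx
    omega

def mix_priority_waiting (waiting_entries : List (List (String × String))) : List (List (String × String)) :=
  let regular := waiting_entries.filter (fun e => pvGetPriority e != some "senior_pwd")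
  let senior := waiting_entries.filter (fun e => pvGetPriority e == some "senior_pwd")
  pvMixLoop regular senior 0 0 []

-- ===== PORT B =====
def mix_priority_waiting_alt (waiting_entries : List (List (String × String))) : List (List (String × String)) :=
  -- single partition pass: (senior if … else regular).append(entry)
  let p := waiting_entries.foldl
    (fun (p : List (List (String × String)) × List (List (String × String))) e =>
      if pvGetPriority e == some "senior_pwd" then (p.1, p.2 ++ [e]) else (p.1 ++ [e], p.2))
    ([], [])
  let regular := p.1
  let senior := p.2
  let nblocks := max ((regular.length + 2) / 3) senior.length
  -- for k in range(nblocks): mixed += regular[3*k:3*k+3]; mixed += senior[k:k+1]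
  -- (nonnegative slices ported as drop/take, exact here)
  (List.range nblocks).foldl
    (fun mixed k => mixed ++ ((regular.drop (3 * k)).take 3) ++ ((senior.drop k).take 1)) []

-- ===== PRECONDITION & SPEC =====
def Spec_mix_priority_waiting (waiting_entries : List (List (String × String))) (out : List (List (String × String))) : Prop := out = mix_priority_waiting_alt waiting_entries
instance (waiting_entries : List (List (String × String))) (out : List (List (String × String))) : Decidable (Spec_mix_priority_waiting waiting_entries out) := by unfold Spec_mix_priority_waiting; infer_instance

-- ===== CLAIM (what is proved, stated in full; the proofs are below) =====
def Claim_equal_mix_priority_waiting : Prop := ∀ (waiting_entries : List (List (String × String))), Dom_mix_priority_waiting waiting_entries → Spec_mix_priority_waiting waiting_entries (mix_priority_waiting waiting_entries)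

-- ===== LEMMAS AND PROOFS =====

-- canonical interleaving: 3 regulars, then 1 senior, tail of whichever remains
def pvMix3 : List (List (String × String)) → List (List (String × String)) → List (List (String × String))
  | reg, [] => reg
  | reg, s :: ss => reg.take 3 ++ s :: pvMix3 (reg.drop 3) ss

theorem pvMix3_nil_left : ∀ ss : List (List (String × String)), pvMix3 [] ss = ss := by
  intro ss
  induction ss with
  | nil => rfl
  | cons s t ih => simp [pvMix3, ih]

theorem pvStep3_eq (regular acc : List (List (String × String))) (ri : Nat)
    (hri : ri ≤ regular.length) :
    pvStepReg regular (pvStepReg regular (pvStepReg regular (acc, ri))) =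
      (acc ++ (regular.drop ri).take 3, min (ri + 3) regular.length) := by
  have hlen : (regular.drop ri).length = regular.length - ri := by simp
  have g : ∀ k : Nat, regular[ri + k]? = (regular.drop ri)[k]? := by
    intro k; rw [List.getElem?_drop]
  have g0 : regular[ri]? = (regular.drop ri)[0]? := by simpa using g 0
  have g1 := g 1
  have g2 := g 2
  rcases hl : regular.drop ri with _ | ⟨a, _ | ⟨b, _ | ⟨c, t⟩⟩⟩ <;>
    rw [hl] at g0 g1 g2 <;>
    rw [hl] at hlen <;>
    simp only [List.length_nil, List.length_cons] at hlen <;>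
    simp [pvStepReg, g0, g1, g2] <;>
    omega

theorem pvDrop_min (reg : List (List (String × String))) (k : Nat) :
    reg.drop (min k reg.length) = reg.drop k := by
  rcases le_total k reg.length with h | h
  · rw [Nat.min_eq_left h]
  · rw [Nat.min_eq_right h, List.drop_length, List.drop_eq_nil_of_le h]

theorem pvMix3_nil_right (r : List (List (String × String))) : pvMix3 r [] = r := by
  simp [pvMix3]

theorem pvMixLoop_eq (regular senior : List (List (String × String))) :
    ∀ ri si acc, ri ≤ regular.length →
      pvMixLoop regular senior ri si acc = acc ++ pvMix3 (regular.drop ri) (senior.drop si) := by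
  intro ri si acc
  fun_induction pvMixLoop regular senior ri si acc with
  | case1 ri si mixed h s hs mixed' hbrk =>
    intro hri
    have hs2 : s = (mixed ++ (regular.drop ri).take 3, min (ri + 3) regular.length) :=
      (rfl : s = _).trans (pvStep3_eq regular mixed ri hri)
    have hm' : mixed' = s.1 ++ [senior.getD si []] := rfl
    have hsen : senior.drop si = senior[si] :: senior.drop (si + 1) :=
      List.drop_eq_getElem_cons hs
    have hreg : (regular.drop ri).drop 3 = [] := by
      apply List.drop_eq_nil_of_le
      have hb := hbrk.1
      rw [hs2] at hb
      simp at hb ⊢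
      omega
    rw [hm', hs2, hsen]
    simp [pvMix3, hreg, pvMix3_nil_left, List.getD_eq_getElem?_getD,
      List.getElem?_eq_getElem hs]
  | case2 ri si mixed h s hs mixed' hbrk ih =>
    intro hri
    have hs2 : s = (mixed ++ (regular.drop ri).take 3, min (ri + 3) regular.length) :=
      (rfl : s = _).trans (pvStep3_eq regular mixed ri hri)
    have hm' : mixed' = s.1 ++ [senior.getD si []] := rfl
    have hsen : senior.drop si = senior[si] :: senior.drop (si + 1) :=
      List.drop_eq_getElem_cons hs
    rw [ih (by rw [hs2]; simp)]
    have hdrop : regular.drop (min (ri + 3) regular.length) = (regular.drop ri).drop 3 := by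
      rw [pvDrop_min, List.drop_drop, Nat.add_comm]
    rw [hm', hs2, hsen]
    simp [pvMix3, hdrop, List.getD_eq_getElem?_getD, List.getElem?_eq_getElem hs,
      List.append_assoc]
  | case3 ri si mixed h s hs hbrk =>
    exact absurd hbrk.2 hs
  | case4 ri si mixed h s hs hbrk ih =>
    intro hri
    have hs2 : s = (mixed ++ (regular.drop ri).take 3, min (ri + 3) regular.length) :=
      (rfl : s = _).trans (pvStep3_eq regular mixed ri hri)
    have hsen : senior.drop si = [] := List.drop_eq_nil_of_le (by omega)
    rw [ih (by rw [hs2]; simp)]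
    have hdrop : regular.drop (min (ri + 3) regular.length) = (regular.drop ri).drop 3 := by
      rw [pvDrop_min, List.drop_drop, Nat.add_comm]
    rw [hs2, hsen]
    simp [pvMix3_nil_right, hdrop, List.append_assoc]
  | case5 ri si mixed h =>
    intro hri
    simp only [not_or, Nat.not_lt] at h
    simp [List.drop_eq_nil_of_le h.1, List.drop_eq_nil_of_le h.2, pvMix3]

theorem pvChunks_concat (n : Nat) :
    ∀ reg : List (List (String × String)), reg.length ≤ 3 * n →
      (List.range n).flatMap (fun k => (reg.drop (3 * k)).take 3) = reg := by
  induction n with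
  | zero =>
    intro reg h
    simp only [Nat.mul_zero, Nat.le_zero] at h
    simp [List.eq_nil_of_length_eq_zero h]
  | succ m ih =>
    intro reg h
    rw [List.range_succ_eq_map]
    simp only [List.flatMap_cons, List.flatMap_map]
    have step : ∀ k : Nat, reg.drop (3 * (k + 1)) = (reg.drop 3).drop (3 * k) := by
      intro k; rw [List.drop_drop]; ring_nf
    have : ((List.range m).flatMap fun k => (reg.drop (3 * (k + 1))).take 3) = reg.drop 3 := by
      have := ih (reg.drop 3) (by simp; omega)
      calc ((List.range m).flatMap fun k => (reg.drop (3 * (k + 1))).take 3)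
          = (List.range m).flatMap fun k => ((reg.drop 3).drop (3 * k)).take 3 := by
            apply List.flatMap_congr; intro k _; rw [step]
        _ = reg.drop 3 := this
    rw [this]
    simp

theorem pvBlocks_eq_mix3 (sen : List (List (String × String))) :
    ∀ (reg : List (List (String × String))) (n : Nat),
      n = max ((reg.length + 2) / 3) sen.length →
      (List.range n).flatMap (fun k => (reg.drop (3 * k)).take 3 ++ (sen.drop k).take 1) =
        pvMix3 reg sen := by
  induction sen with
  | nil =>
    intro reg n hn
    simp only [List.length_nil] at hn
    have : ∀ k : Nat, (([] : List (List (String × String))).drop k).take 1 = [] := by simp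
    simp only [this, List.append_nil, pvMix3]
    exact pvChunks_concat n reg (by omega)
  | cons s ss ih =>
    intro reg n hn
    simp only [List.length_cons] at hn
    have hn1 : 1 ≤ n := by omega
    obtain ⟨m, rfl⟩ : ∃ m, n = m + 1 := ⟨n - 1, by omega⟩
    rw [List.range_succ_eq_map]
    simp only [List.flatMap_cons, List.flatMap_map]
    have hm : m = max (((reg.drop 3).length + 2) / 3) ss.length := by
      simp only [List.length_drop]
      omega
    have tail_eq :
        ((List.range m).flatMap fun k => (reg.drop (3 * (k + 1))).take 3 ++ (((s :: ss).drop (k + 1)).take 1)) =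
          pvMix3 (reg.drop 3) ss := by
      have := ih (reg.drop 3) m hm
      calc ((List.range m).flatMap fun k => (reg.drop (3 * (k + 1))).take 3 ++ (((s :: ss).drop (k + 1)).take 1))
          = (List.range m).flatMap fun k => ((reg.drop 3).drop (3 * k)).take 3 ++ ((ss.drop k).take 1) := by
            apply List.flatMap_congr; intro k _
            rw [show reg.drop (3 * (k + 1)) = (reg.drop 3).drop (3 * k) by rw [List.drop_drop]; ring_nf]
            rfl
        _ = pvMix3 (reg.drop 3) ss := this
    rw [tail_eq]
    simp [pvMix3]

theorem pvPartition_eq (ws : List (List (String × String))) :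
    ∀ r0 s0 : List (List (String × String)),
    ws.foldl (fun (p : List (List (String × String)) × List (List (String × String))) e =>
      if pvGetPriority e == some "senior_pwd" then (p.1, p.2 ++ [e]) else (p.1 ++ [e], p.2)) (r0, s0) =
      (r0 ++ ws.filter (fun e => pvGetPriority e != some "senior_pwd"),
       s0 ++ ws.filter (fun e => pvGetPriority e == some "senior_pwd")) := by
  induction ws with
  | nil => simp
  | cons e t ih =>
    intro r0 s0
    simp only [List.foldl_cons, List.filter_cons, bne]
    by_cases hc : (pvGetPriority e == some "senior_pwd") = true
    · rw [if_pos hc, ih]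
      simp [hc, bne]
    · rw [if_neg hc, ih]
      simp [hc, bne]

theorem pvFoldBlocks (f g : Nat → List (List (String × String))) :
    ∀ (l : List Nat) (acc : List (List (String × String))),
      l.foldl (fun m k => m ++ f k ++ g k) acc = acc ++ l.flatMap (fun k => f k ++ g k) := by
  intro l
  induction l with
  | nil => simp
  | cons k t ih => intro acc; rw [List.foldl_cons, ih, List.flatMap_cons]; simp [List.append_assoc]

-- ===== VERDICT (by name: the statement is the Claim_ definition above) =====
theorem mix_priority_waiting_spec : Claim_equal_mix_priority_waiting := by
  intro ws _
  unfold Spec_mix_priority_waiting mix_priority_waiting mix_priority_waiting_alt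
  rw [pvPartition_eq]
  simp only
  rw [pvFoldBlocks]
  rw [pvBlocks_eq_mix3 _ _ _ rfl]
  rw [pvMixLoop_eq _ _ 0 0 [] (Nat.zero_le _)]
  simp
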